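-- pv_equiv track=rewrite | github.com/sonjuhyeon/programmers_coding_test | 프로그래머스/3/12987. 숫자 게임/숫자 게임.py | solution
-- ===== SOURCE A (Python) =====
-- def solution(A, B):
--     score = 0
--     A.sort()
--     B.sort()
--     a_weakest = 0
--
--     for b in B:
--         if b > A[a_weakest]:
--             a_weakest += 1
--             score += 1
--     return score
-- ===== SOURCE B (Python) =====
-- def solution(A, B):
--     # Rank-counting: b can become the next win iff its rank in A (number of
--     # strictly weaker A elements, found by binary search) exceeds the wins
--     # already scored.  No 'weakest unbeaten' pointer is kept.
--     A.sort()
--     B.sort()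
--     wins = 0
--     for b in B:
--         lo, hi = 0, len(A)
--         while lo < hi:
--             mid = (lo + hi) // 2
--             if A[mid] < b:
--                 lo = mid + 1
--             else:
--                 hi = mid
--         if lo > wins:
--             wins += 1
--     return wins
-- ===== Notes on version B (the rewrite author's own statement) =====
-- stated objective: alternative
-- what changed: A walks a 'weakest unbeaten' pointer through sorted A while scanning B; B keeps no pointer into A: for each b of sorted B it computes b's rank in sorted A by a hand-written binary search and scores a win exactly when that rank exceeds the wins so far.
-- outside the precondition, e.g. on solution([5], [1, 2]): A returns 0, B returns 0; on solution([1], [2, 3]): A raises IndexError, B returns 1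
import Mathlib
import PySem

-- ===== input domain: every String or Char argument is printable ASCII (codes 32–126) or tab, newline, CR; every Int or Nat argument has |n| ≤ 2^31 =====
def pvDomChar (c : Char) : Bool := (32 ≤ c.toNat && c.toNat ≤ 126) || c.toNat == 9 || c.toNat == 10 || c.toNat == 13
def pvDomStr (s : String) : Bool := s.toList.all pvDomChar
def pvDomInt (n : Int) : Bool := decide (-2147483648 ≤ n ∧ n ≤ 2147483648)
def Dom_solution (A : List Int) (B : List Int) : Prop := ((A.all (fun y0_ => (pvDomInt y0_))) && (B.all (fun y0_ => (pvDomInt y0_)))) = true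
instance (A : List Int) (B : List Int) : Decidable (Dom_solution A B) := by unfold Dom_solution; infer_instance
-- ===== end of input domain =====

-- B replaces A's 'weakest unbeaten' pointer walk through sorted A by rank counting: for each b of
-- sorted B it finds b's rank in sorted A by a hand-written binary search and wins exactly when
-- that rank exceeds the wins so far; same return value on Pre_. Both Pythons sort both arguments
-- in place; the equivalence proved here is about the return value.

-- ===== PORT A =====
-- the 'for b in B' loop with index a_weakest into sorted A; pyGet? = none is Python's
-- IndexError (reachable only outside Pre_solution); the port stops with the current score there.
def goA (sA : List Int) : List Int → Int → Int → Int
  | [], _, score => score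
  | b :: bs, i, score =>
    match PySem.List.pyGet? sA i with
    | none => score
    | some a => if b > a then goA sA bs (i + 1) (score + 1) else goA sA bs i score

def solution (A : List Int) (B : List Int) : Int :=
  goA (PySem.List.sorted A (fun x => x) false) (PySem.List.sorted B (fun x => x) false) 0 0

-- ===== PORT B =====
-- termination helper for the binary-search loop, cited by decreasing_by below
theorem pvMidBounds (lo hi : Int) (h : lo < hi) :
    lo ≤ PySem.Int.floordiv (lo + hi) 2 ∧ PySem.Int.floordiv (lo + hi) 2 < hi := by
  unfold PySem.Int.floordiv
  have h1 := Int.mul_fdiv_add_fmod (lo + hi) 2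
  have h2 := Int.fmod_nonneg_of_pos (lo + hi) (b := 2) (by norm_num)
  have h3 := Int.fmod_lt_of_pos (lo + hi) (b := 2) (by norm_num)
  omega

-- the 'while lo < hi' binary search: rank of b in sA (Source B's hand-written bisect_left);
-- pyGet? = none is IndexError, unreachable for 0 ≤ lo < hi ≤ len(sA)
def rankIn (sA : List Int) (b : Int) (lo hi : Int) : Int :=
  if h : lo < hi then
    let mid := PySem.Int.floordiv (lo + hi) 2
    match PySem.List.pyGet? sA mid with
    | none => lo
    | some a => if a < b then rankIn sA b (mid + 1) hi else rankIn sA b lo mid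
  else lo
  termination_by (hi - lo).toNat
  decreasing_by
  · have := pvMidBounds lo hi h; omega
  · have := pvMidBounds lo hi h; omega

-- the 'for b in B' loop over sorted B with the wins accumulator
def goB (sA : List Int) : List Int → Int → Int
  | [], wins => wins
  | b :: bs, wins =>
    if rankIn sA b 0 (sA.length : Int) > wins then goB sA bs (wins + 1) else goB sA bs wins

def solution_alt (A : List Int) (B : List Int) : Int :=
  goB (PySem.List.sorted A (fun x => x) false) (PySem.List.sorted B (fun x => x) false) 0

-- ===== PRECONDITION & SPEC =====
-- Pre_ excludes inputs with len(B) > len(A): on some of those A's index a_weakest runs past the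
-- end of A and raises IndexError; which of them raise depends on the data, so the whole class is
-- excluded (on the rest A and B still agree).
def Pre_solution (A : List Int) (B : List Int) : Prop := B.length ≤ A.length
instance (A : List Int) (B : List Int) : Decidable (Pre_solution A B) := by unfold Pre_solution; infer_instance
def pvWitness_solution : List Int × List Int := ([1, 3], [2])

def Spec_solution (A : List Int) (B : List Int) (out : Int) : Prop := out = solution_alt A B
instance (A : List Int) (B : List Int) (out : Int) : Decidable (Spec_solution A B out) := by unfold Spec_solution; infer_instance

-- ===== CLAIM (what is proved, stated in full; the proofs are below) =====
def Claim_equal_solution : Prop := ∀ (A : List Int) (B : List Int), Dom_solution A B → Pre_solution A B → Spec_solution A B (solution A B)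

-- ===== LEMMAS AND PROOFS =====

-- for a nondecreasing list, 'more than i elements are < b' is 'the i-th element is < b'
theorem countP_sorted_gt (l : List Int) (hl : l.Pairwise (· ≤ ·)) (b : Int) :
    ∀ (i : Nat), (hi : i < l.length) →
      (i < l.countP (fun a => decide (a < b)) ↔ l[i] < b) := by
  induction l with
  | nil => intro i hi; simp at hi
  | cons x xs ih =>
    intro i hi
    have hx0 : ∀ y ∈ xs, x ≤ y := (List.pairwise_cons.mp hl).1
    have hxs : xs.Pairwise (· ≤ ·) := hl.tail
    rw [List.countP_cons]
    by_cases hxb : x < b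
    · have hxb' : (decide (x < b)) = true := by simpa using hxb
      cases i with
      | zero => rw [if_pos hxb']; simpa using hxb
      | succ i =>
        have hi' : i < xs.length := by simpa using hi
        have h2 := ih hxs i hi'
        rw [if_pos hxb', List.getElem_cons_succ, ← h2]
        omega
    · have hxb' : ¬ ((decide (x < b)) = true) := by simpa using hxb
      have hz : xs.countP (fun a => decide (a < b)) = 0 := by
        apply List.countP_eq_zero.mpr
        intro y hy
        simp only [decide_eq_true_eq]
        have := hx0 y hy; omega
      rw [if_neg hxb', hz]
      cases i with
      | zero => simpa using hxb
      | succ i =>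
        have hi' : i < xs.length := by simpa using hi
        have hyb : ¬ xs[i] < b := by have := hx0 _ (List.getElem_mem hi'); omega
        rw [List.getElem_cons_succ]
        constructor
        · intro h; omega
        · intro h; exact absurd h hyb

theorem goA_cons (sA bs : List Int) (i score b a : Int)
    (h : PySem.List.pyGet? sA i = some a) :
    goA sA (b :: bs) i score
      = if b > a then goA sA bs (i + 1) (score + 1) else goA sA bs i score := by
  rw [goA, h]

theorem rankIn_step (sA : List Int) (b lo hi a : Int) (hlt : lo < hi)
    (h : PySem.List.pyGet? sA (PySem.Int.floordiv (lo + hi) 2) = some a) :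
    rankIn sA b lo hi
      = if a < b then rankIn sA b (PySem.Int.floordiv (lo + hi) 2 + 1) hi
        else rankIn sA b lo (PySem.Int.floordiv (lo + hi) 2) := by
  rw [rankIn, dif_pos hlt]
  simp only [h]

theorem pyGet?_sorted (l : List Int) (i : Int) (h0 : 0 ≤ i) (hlt : i.toNat < l.length) :
    PySem.List.pyGet? l i = some l[i.toNat] := by
  obtain ⟨n, rfl⟩ : ∃ n : Nat, i = (n : Int) := ⟨i.toNat, (Int.toNat_of_nonneg h0).symm⟩
  rw [PySem.List.pyGet?_natCast]
  simp only [Int.toNat_natCast] at hlt ⊢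
  simp [List.getElem?_eq_getElem hlt]

-- the binary search computes the number of elements < b of the sorted list
theorem rankIn_eq_countP (sA : List Int) (hs : sA.Pairwise (· ≤ ·)) (b : Int) :
    ∀ (n : Nat) (lo hi : Int), (hi - lo).toNat ≤ n → 0 ≤ lo → lo ≤ hi → hi ≤ sA.length →
      (∀ (j : Nat) (hj : j < sA.length), j < lo.toNat → sA[j] < b) →
      (∀ (j : Nat) (hj : j < sA.length), hi.toNat ≤ j → ¬ sA[j] < b) →
      rankIn sA b lo hi = (sA.countP (fun a => decide (a < b)) : Int) := by
  intro n
  induction n with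
  | zero =>
    intro lo hi hn h0 hlh hhi hpre hsuf
    have heq : lo = hi := by omega
    subst heq
    rw [rankIn, dif_neg (by omega)]
    have hle : sA.countP (fun a => decide (a < b)) ≤ sA.length := List.countP_le_length
    have hub : sA.countP (fun a => decide (a < b)) ≤ lo.toNat := by
      by_contra hgt
      rw [Nat.not_le] at hgt
      have hltlen : lo.toNat < sA.length := by omega
      exact hsuf lo.toNat hltlen le_rfl
        ((countP_sorted_gt sA hs b lo.toNat hltlen).mp (by omega))
    have hlb : lo.toNat ≤ sA.countP (fun a => decide (a < b)) := by
      rcases Nat.eq_zero_or_pos lo.toNat with hz | hpos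
      · omega
      · have hj : lo.toNat - 1 < sA.length := by omega
        have := (countP_sorted_gt sA hs b (lo.toNat - 1) hj).mpr
          (hpre (lo.toNat - 1) hj (by omega))
        omega
    omega
  | succ n ih =>
    intro lo hi hn h0 hlh hhi hpre hsuf
    by_cases hlt : lo < hi
    · have hmid := pvMidBounds lo hi hlt
      set mid := PySem.Int.floordiv (lo + hi) 2 with hmiddef
      have hm0 : 0 ≤ mid := by omega
      have hmlen : mid.toNat < sA.length := by omega
      rw [rankIn_step sA b lo hi sA[mid.toNat] hlt
        (by rw [← hmiddef]; exact pyGet?_sorted sA mid hm0 hmlen), ← hmiddef]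
      have hmono := List.pairwise_iff_getElem.mp hs
      by_cases hab : sA[mid.toNat] < b
      · rw [if_pos hab]
        apply ih (mid + 1) hi (by omega) (by omega) (by omega) hhi
        · intro j hj hjlt
          have hjm : j ≤ mid.toNat := by omega
          rcases Nat.lt_or_ge j mid.toNat with hc | hc
          · have := hmono j mid.toNat hj hmlen hc
            omega
          · have : j = mid.toNat := by omega
            subst this; exact hab
        · exact hsuf
      · rw [if_neg hab]
        apply ih lo mid (by omega) h0 (by omega) (by omega) hpre
        intro j hj hjge
        rcases Nat.lt_or_ge mid.toNat j with hc | hc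
        · have := hmono mid.toNat j hmlen hj hc
          omega
        · have : j = mid.toNat := by omega
          subst this; exact hab
    · exact ih lo hi (by omega) h0 hlh hhi hpre hsuf

-- the two loops agree when both counters start at the same value i and B's tail fits in A
theorem agree (sA : List Int) (hs : sA.Pairwise (· ≤ ·)) :
    ∀ (bs : List Int) (i : Int), 0 ≤ i → i.toNat + bs.length ≤ sA.length →
      goA sA bs i i = goB sA bs i := by
  intro bs
  induction bs with
  | nil => intro i _ _; rfl
  | cons b bs ih =>
    intro i h0 hlen
    have hlt : i.toNat < sA.length := by simp at hlen; omega
    have hrank : rankIn sA b 0 (sA.length : Int)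
        = (sA.countP (fun a => decide (a < b)) : Int) :=
      rankIn_eq_countP sA hs b sA.length 0 (sA.length : Int) (by omega) le_rfl (by omega)
        le_rfl (by omega) (fun j hj hge => by omega)
    have hcond : rankIn sA b 0 (sA.length : Int) > i ↔ b > sA[i.toNat] := by
      rw [hrank]
      have := countP_sorted_gt sA hs b i.toNat hlt
      constructor
      · intro h; exact (this.mp (by omega))
      · intro h; have := this.mpr h; omega
    rw [goA_cons sA bs i i b _ (pyGet?_sorted sA i h0 hlt), goB]
    by_cases hb : b > sA[i.toNat]
    · rw [if_pos hb, if_pos (hcond.mpr hb)]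
      exact ih (i + 1) (by omega) (by simp at hlen ⊢; omega)
    · rw [if_neg hb, if_neg (fun h => hb (hcond.mp h))]
      exact ih i h0 (by simp at hlen ⊢; omega)

-- ===== VERDICT (by name: the statement is the Claim_ definition above) =====
theorem solution_spec : Claim_equal_solution := by
  intro A B _ hpre
  unfold Spec_solution solution solution_alt
  have hlenA : (PySem.List.sorted A (fun x => x) false).length = A.length :=
    (PySem.List.sorted_perm A (fun x => x) false).length_eq
  have hlenB : (PySem.List.sorted B (fun x => x) false).length = B.length :=
    (PySem.List.sorted_perm B (fun x => x) false).length_eq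
  exact agree _ (by simpa using PySem.List.sorted_pairwise A (fun x => x)) _ 0 le_rfl
    (by simp [hlenA, hlenB]; exact hpre)
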